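-- pv_equiv track=rewrite | github.com/akiddo-bob/hospitalist-scheduler | block/engines/shared/loader.py | get_eligible_sites
-- ===== SOURCE A (Python) =====
-- PCT_TO_SITES = {
--     "pct_cooper":      ["Cooper"],
--     "pct_inspira_veb": ["Vineland", "Elmer"],
--     "pct_inspira_mhw": ["Mullica Hill"],
--     "pct_mannington":  ["Mannington"],
--     "pct_virtua":      ["Virtua Voorhees", "Virtua Marlton", "Virtua Willingboro", "Virtua Mt Holly"],
--     "pct_cape":        ["Cape"],
-- }
--
-- def get_eligible_sites(provider_name, provider_data, tags_data):
--     """Return list of sites a provider can work at.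
--
--     Based on percentage allocations (> 0) minus tag-based restrictions
--     (no_elmer, no_vineland).
--
--     Args:
--         provider_name: str
--         provider_data: dict with pct_* fields
--         tags_data: dict provider_name -> [{"tag": ..., "rule": ...}, ...]
--
--     Returns:
--         list of site name strings
--     """
--     sites = []
--
--     for pct_field, site_list in PCT_TO_SITES.items():
--         if provider_data.get(pct_field, 0) > 0:
--             sites.extend(site_list)
--
--     # Apply tag-based restrictions
--     ptags = tags_data.get(provider_name, [])
--     for t in ptags:
--         tag = t["tag"]
--         if tag == "no_elmer":
--             sites = [s for s in sites if s != "Elmer"]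
--         elif tag == "no_vineland":
--             sites = [s for s in sites if s != "Vineland"]
--
--     return sites
-- ===== SOURCE B (Python) =====
-- PCT_TO_SITES = {
--     "pct_cooper":      ["Cooper"],
--     "pct_inspira_veb": ["Vineland", "Elmer"],
--     "pct_inspira_mhw": ["Mullica Hill"],
--     "pct_mannington":  ["Mannington"],
--     "pct_virtua":      ["Virtua Voorhees", "Virtua Marlton", "Virtua Willingboro", "Virtua Mt Holly"],
--     "pct_cape":        ["Cape"],
-- }
--
-- def get_eligible_sites(provider_name, provider_data, tags_data):
--     forbidden = set()
--     for t in tags_data.get(provider_name, []):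
--         tag = t["tag"]
--         if tag == "no_elmer":
--             forbidden.add("Elmer")
--         elif tag == "no_vineland":
--             forbidden.add("Vineland")
--     return [s
--             for field, site_list in PCT_TO_SITES.items()
--             if provider_data.get(field, 0) > 0
--             for s in site_list
--             if s not in forbidden]
-- ===== Notes on version B (the rewrite author's own statement) =====
-- stated objective: alternative
-- what changed: Instead of rebuilding the whole site list once per restriction tag, B first folds the tags into a forbidden set and then builds the result in a single comprehension over PCT_TO_SITES that fuses the percentage test and the exclusion filter.
import Mathlib
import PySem

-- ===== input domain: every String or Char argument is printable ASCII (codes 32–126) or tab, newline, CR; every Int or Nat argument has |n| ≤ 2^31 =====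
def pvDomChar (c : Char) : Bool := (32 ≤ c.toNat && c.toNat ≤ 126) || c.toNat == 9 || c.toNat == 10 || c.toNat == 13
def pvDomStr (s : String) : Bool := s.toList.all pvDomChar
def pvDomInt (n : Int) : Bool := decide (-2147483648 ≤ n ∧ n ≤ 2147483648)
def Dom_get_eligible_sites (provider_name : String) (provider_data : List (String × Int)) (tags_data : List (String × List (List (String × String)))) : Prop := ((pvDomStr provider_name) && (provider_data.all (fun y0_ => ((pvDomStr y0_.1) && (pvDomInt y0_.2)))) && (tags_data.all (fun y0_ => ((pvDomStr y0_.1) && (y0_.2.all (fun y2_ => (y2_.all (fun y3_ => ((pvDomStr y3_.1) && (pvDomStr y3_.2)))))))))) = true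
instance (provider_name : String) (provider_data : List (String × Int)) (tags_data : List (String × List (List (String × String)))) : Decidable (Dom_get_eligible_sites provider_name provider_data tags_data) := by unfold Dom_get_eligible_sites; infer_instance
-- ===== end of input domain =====

-- B replaces A's per-tag rebuilds of the site list by one forbidden-set fold plus a single fused
-- construction/filter pass over PCT_TO_SITES (objective: alternative decomposition, same result).


-- module constant PCT_TO_SITES (a dict literal; shared by both ports)
def pctToSites : List (String × List String) :=
  [("pct_cooper", ["Cooper"]),
   ("pct_inspira_veb", ["Vineland", "Elmer"]),
   ("pct_inspira_mhw", ["Mullica Hill"]),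
   ("pct_mannington", ["Mannington"]),
   ("pct_virtua", ["Virtua Voorhees", "Virtua Marlton", "Virtua Willingboro", "Virtua Mt Holly"]),
   ("pct_cape", ["Cape"])]

-- t["tag"]; the .getD "" default is unreachable under Pre_ (Python raises KeyError exactly there)
def pvTagOf (t : List (String × String)) : String := ((PySem.Dict.mk t).get? "tag").getD ""

-- ===== PORT A =====
def get_eligible_sites (provider_name : String) (provider_data : List (String × Int)) (tags_data : List (String × List (List (String × String)))) : List String :=
  -- sites = []; for pct_field, site_list in PCT_TO_SITES.items(): if provider_data.get(pct_field,0) > 0: sites.extend(site_list)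
  let sites := pctToSites.foldl
    (fun acc p => if (PySem.Dict.mk provider_data).getD p.1 0 > 0 then acc ++ p.2 else acc) []
  -- ptags = tags_data.get(provider_name, []); per-tag list rebuilds
  let ptags := (PySem.Dict.mk tags_data).getD provider_name []
  ptags.foldl
    (fun sites t =>
      let tag := pvTagOf t
      if tag = "no_elmer" then sites.filter (fun s => s != "Elmer")
      else if tag = "no_vineland" then sites.filter (fun s => s != "Vineland")
      else sites)
    sites

-- ===== PORT B =====
def get_eligible_sites_alt (provider_name : String) (provider_data : List (String × Int)) (tags_data : List (String × List (List (String × String)))) : List String :=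
  -- forbidden = set(); one pass over the tags
  let forbidden : PySem.Set String :=
    ((PySem.Dict.mk tags_data).getD provider_name []).foldl
      (fun fb t =>
        let tag := pvTagOf t
        if tag = "no_elmer" then PySem.Set.add fb "Elmer"
        else if tag = "no_vineland" then PySem.Set.add fb "Vineland"
        else fb)
      PySem.Set.empty
  -- single comprehension over PCT_TO_SITES.items()
  pctToSites.flatMap
    (fun p =>
      if (PySem.Dict.mk provider_data).getD p.1 0 > 0
      then p.2.filter (fun s => !(PySem.Set.contains forbidden s))
      else [])

-- ===== PRECONDITION & SPEC =====
-- Pre_ excludes inputs where some tag dict of the looked-up provider lacks the key "tag":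
-- there Python A (and B) raise KeyError on t["tag"].
def Pre_get_eligible_sites (provider_name : String) (provider_data : List (String × Int)) (tags_data : List (String × List (List (String × String)))) : Prop :=
  ∀ t ∈ (PySem.Dict.mk tags_data).getD provider_name [], ((PySem.Dict.mk t).get? "tag").isSome
instance (provider_name : String) (provider_data : List (String × Int)) (tags_data : List (String × List (List (String × String)))) : Decidable (Pre_get_eligible_sites provider_name provider_data tags_data) := by unfold Pre_get_eligible_sites; infer_instance

def pvWitness_get_eligible_sites : String × (List (String × Int)) × (List (String × List (List (String × String)))) :=
  ("alice", [("pct_cooper", 50), ("pct_inspira_veb", 50)], [("alice", [[("tag", "no_elmer")]])])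

def Spec_get_eligible_sites (provider_name : String) (provider_data : List (String × Int)) (tags_data : List (String × List (List (String × String)))) (out : List String) : Prop := out = get_eligible_sites_alt provider_name provider_data tags_data
instance (provider_name : String) (provider_data : List (String × Int)) (tags_data : List (String × List (List (String × String)))) (out : List String) : Decidable (Spec_get_eligible_sites provider_name provider_data tags_data out) := by unfold Spec_get_eligible_sites; infer_instance

-- ===== CLAIM (what is proved, stated in full; the proofs are below) =====
def Claim_equal_get_eligible_sites : Prop := ∀ (provider_name : String) (provider_data : List (String × Int)) (tags_data : List (String × List (List (String × String)))), Dom_get_eligible_sites provider_name provider_data tags_data → Pre_get_eligible_sites provider_name provider_data tags_data → Spec_get_eligible_sites provider_name provider_data tags_data (get_eligible_sites provider_name provider_data tags_data)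

-- ===== LEMMAS AND PROOFS =====

-- "s would be removed by some tag of the list"
def pvForb (tags : List (List (String × String))) (s : String) : Bool :=
  tags.any (fun t => (pvTagOf t == "no_elmer" && s == "Elmer") || (pvTagOf t == "no_vineland" && s == "Vineland"))

lemma contains_add (fb : PySem.Set String) (x s : String) :
    PySem.Set.contains (PySem.Set.add fb x) s = (PySem.Set.contains fb s || s == x) := by
  simp only [PySem.Set.add]
  by_cases hc : PySem.Set.contains fb x
  · rw [if_pos hc]
    by_cases hsx : s = x
    · subst hsx; simp_all [PySem.Set.contains]
    · simp [beq_eq_false_iff_ne.mpr hsx]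
  · rw [if_neg hc]
    by_cases hsx : s = x
    · subst hsx; simp [PySem.Set.contains, List.mem_append]
    · simp [PySem.Set.contains, List.mem_append, hsx, beq_eq_false_iff_ne.mpr hsx]

-- membership in B's forbidden set, fold characterised
lemma forb_fold_contains (tags : List (List (String × String))) (fb : PySem.Set String) (s : String) :
    PySem.Set.contains
      (tags.foldl
        (fun fb t =>
          let tag := pvTagOf t
          if tag = "no_elmer" then PySem.Set.add fb "Elmer"
          else if tag = "no_vineland" then PySem.Set.add fb "Vineland"
          else fb)
        fb) s
    = (PySem.Set.contains fb s || pvForb tags s) := by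
  induction tags generalizing fb with
  | nil => simp [pvForb]
  | cons t ts ih =>
    simp only [List.foldl_cons, pvForb, List.any_cons]
    rw [ih]
    by_cases he : pvTagOf t = "no_elmer"
    · rw [if_pos he, contains_add]
      cases hc : PySem.Set.contains fb s <;> cases hx : (s == "Elmer") <;>
        simp [he, hx, pvForb]
    · rw [if_neg he]
      by_cases hv : pvTagOf t = "no_vineland"
      · rw [if_pos hv, contains_add]
        cases hc : PySem.Set.contains fb s <;> cases hx : (s == "Vineland") <;>
          simp [hv, hx, pvForb]
      · rw [if_neg hv]
        simp [pvForb, beq_eq_false_iff_ne.mpr he, beq_eq_false_iff_ne.mpr hv]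

-- A's sequence of per-tag rebuilds is one filter by pvForb
lemma a_fold_filter (tags : List (List (String × String))) (base : List String) :
    tags.foldl
      (fun sites t =>
        let tag := pvTagOf t
        if tag = "no_elmer" then sites.filter (fun s => s != "Elmer")
        else if tag = "no_vineland" then sites.filter (fun s => s != "Vineland")
        else sites)
      base
    = base.filter (fun s => !pvForb tags s) := by
  induction tags generalizing base with
  | nil => simp [pvForb]
  | cons t ts ih =>
    simp only [List.foldl_cons]
    by_cases he : pvTagOf t = "no_elmer"
    · rw [if_pos he, ih, List.filter_filter]
      apply List.filter_congr
      intro s _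
      cases hx : (s == "Elmer") <;>
        simp [pvForb, he, hx, bne]
    · rw [if_neg he]
      by_cases hv : pvTagOf t = "no_vineland"
      · rw [if_pos hv, ih, List.filter_filter]
        apply List.filter_congr
        intro s _
        cases hx : (s == "Vineland") <;>
          simp [pvForb, hv, hx, bne]
      · rw [if_neg hv, ih]
        apply List.filter_congr
        intro s _
        simp [pvForb, beq_eq_false_iff_ne.mpr he, beq_eq_false_iff_ne.mpr hv]

-- filter over the append-if accumulation = flatMap of filtered pieces
lemma build_filter_flatMap (l : List (String × List String)) (c : String → Prop)
    [DecidablePred c] (g : String → Bool) (init : List String) :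
    (l.foldl (fun acc p => if c p.1 then acc ++ p.2 else acc) init).filter g
    = init.filter g ++ l.flatMap (fun p => if c p.1 then p.2.filter g else []) := by
  induction l generalizing init with
  | nil => simp
  | cons p ps ih =>
    simp only [List.foldl_cons, List.flatMap_cons]
    by_cases hc : c p.1
    · rw [if_pos hc, ih, List.filter_append, if_pos hc, List.append_assoc]
    · rw [if_neg hc, ih, if_neg hc, List.nil_append]

-- ===== VERDICT (by name: the statement is the Claim_ definition above) =====
theorem get_eligible_sites_spec : Claim_equal_get_eligible_sites := by
  intro pn pd td _ _
  show _ = _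
  unfold get_eligible_sites get_eligible_sites_alt
  simp only
  rw [a_fold_filter,
      build_filter_flatMap pctToSites
        (fun f => (PySem.Dict.mk pd).getD f 0 > 0)
        (fun s => !pvForb ((PySem.Dict.mk td).getD pn []) s) []]
  simp only [List.filter_nil, List.nil_append]
  congr 1
  funext p
  by_cases hc : (PySem.Dict.mk pd).getD p.1 0 > 0
  · rw [if_pos hc, if_pos hc]
    apply List.filter_congr
    intro s _
    rw [forb_fold_contains]
    simp [PySem.Set.empty, PySem.Set.contains]
  · rw [if_neg hc, if_neg hc]
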